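-- pv_equiv track=rewrite | github.com/S2mple1/python- | problem2/solveString.py | replace_repeated_chars
-- ===== SOURCE A (Python) =====
-- def replace_repeated_chars(s, k):
--     result = []  # 保存结果
--
--     for i, char in enumerate(s):
--
--         """字符在它前面k个字符中已经出现过"""
--         if char in s[max(0, i - k):i]:
--             result.append('-')
--
--         else:
--             result.append(char)
--
--     return ''.join(result)
-- ===== SOURCE B (Python) =====
-- def replace_repeated_chars(s, k):
--     last = {}
--     out = []
--     for i, ch in enumerate(s):
--         j = last.get(ch)
--         out.append('-' if j is not None and j >= i - k else ch)
--         last[ch] = i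
--     return ''.join(out)
-- ===== Notes on version B (the rewrite author's own statement) =====
-- stated objective: faster
-- what changed: Replaces the per-character scan of the previous-k slice by a dict of last-seen indices: a char is repeated iff its last occurrence index is >= i-k, giving one O(1) lookup per character.
import Mathlib
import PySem

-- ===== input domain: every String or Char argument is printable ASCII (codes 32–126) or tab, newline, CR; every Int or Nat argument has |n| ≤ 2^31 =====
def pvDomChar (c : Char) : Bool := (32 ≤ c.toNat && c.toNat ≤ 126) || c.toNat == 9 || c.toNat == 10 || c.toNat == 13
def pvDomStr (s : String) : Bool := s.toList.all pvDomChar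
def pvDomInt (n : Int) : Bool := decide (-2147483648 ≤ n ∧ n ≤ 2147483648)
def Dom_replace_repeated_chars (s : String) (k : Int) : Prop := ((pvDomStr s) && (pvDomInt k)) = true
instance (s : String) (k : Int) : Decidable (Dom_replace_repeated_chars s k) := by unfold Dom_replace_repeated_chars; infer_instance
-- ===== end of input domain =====

-- B replaces A's per-character scan of the window s[max(0,i-k):i] by a last-seen-index
-- dictionary (repeated iff the last occurrence index is >= i-k); objective: faster.

-- ===== PORT A =====
def replace_repeated_chars (s : String) (k : Int) : String :=
  String.ofList ((PySem.List.enumerate s.toList 0).foldl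
    (fun acc p =>
      if (PySem.List.slice s.toList (some (max 0 (p.1 - k))) (some p.1)).contains p.2
      then acc ++ ['-'] else acc ++ [p.2]) [])

-- ===== PORT B =====
def replace_repeated_chars_alt (s : String) (k : Int) : String :=
  String.ofList ((PySem.List.enumerate s.toList 0).foldl
    (fun st p =>
      let out := match st.1.get? p.2 with
        | some j => if p.1 - k ≤ j then st.2 ++ ['-'] else st.2 ++ [p.2]
        | none => st.2 ++ [p.2]
      (st.1.insert p.2 p.1, out))
    ((PySem.Dict.empty : PySem.Dict Char Int), ([] : List Char))).2

-- ===== PRECONDITION & SPEC =====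
def Spec_replace_repeated_chars (s : String) (k : Int) (out : String) : Prop := out = replace_repeated_chars_alt s k
instance (s : String) (k : Int) (out : String) : Decidable (Spec_replace_repeated_chars s k out) := by unfold Spec_replace_repeated_chars; infer_instance

-- ===== CLAIM (what is proved, stated in full; the proofs are below) =====
def Claim_equal_replace_repeated_chars : Prop := ∀ (s : String) (k : Int), Dom_replace_repeated_chars s k → Spec_replace_repeated_chars s k (replace_repeated_chars s k)

-- ===== LEMMAS AND PROOFS =====

-- index of the last occurrence of c in pre (as Int), none if c is absent
def lastIdx (pre : List Char) (c : Char) : Option Int :=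
  (PySem.List.enumerate pre 0).foldl (fun acc p => if p.2 = c then some p.1 else acc) none

lemma lastIdx_snoc (pre : List Char) (x c : Char) :
    lastIdx (pre ++ [x]) c = if x = c then some (pre.length : Int) else lastIdx pre c := by
  unfold lastIdx
  rw [PySem.List.enumerate_append, List.foldl_append]
  simp [PySem.List.enumerate]

lemma lastIdx_bound (pre : List Char) (c : Char) :
    ∀ j, lastIdx pre c = some j → ∃ jn : Nat, j = (jn : Int) ∧ jn < pre.length := by
  induction pre using List.reverseRecOn with
  | nil => intro j h; simp [lastIdx, PySem.List.enumerate] at h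
  | append_singleton pre x ih =>
    intro j h
    rw [lastIdx_snoc] at h
    by_cases hx : x = c
    · simp [hx] at h; exact ⟨pre.length, by omega, by simp⟩
    · simp [hx] at h
      obtain ⟨jn, h1, h2⟩ := ih j h
      exact ⟨jn, h1, by simp; omega⟩

lemma mem_drop_iff_lastIdx (pre : List Char) (c : Char) (m : Nat) :
    c ∈ pre.drop m ↔ ∃ jn : Nat, lastIdx pre c = some (jn : Int) ∧ m ≤ jn := by
  induction pre using List.reverseRecOn with
  | nil => simp [lastIdx, PySem.List.enumerate]
  | append_singleton pre x ih =>
    rw [lastIdx_snoc]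
    by_cases hm : m ≤ pre.length
    · rw [List.drop_append_of_le_length (by omega)]
      by_cases hx : x = c
      · simp only [hx]
        constructor
        · intro _; exact ⟨pre.length, by simp, hm⟩
        · intro _; simp
      · simp only [if_neg hx, List.mem_append, List.mem_singleton]
        rw [ih]
        constructor
        · rintro (h | h)
          · exact h
          · exact absurd h.symm hx
        · intro h; exact Or.inl h
    · have : (pre ++ [x]).drop m = [] := by
        apply List.drop_eq_nil_of_le; simp; omega
      rw [this]
      simp only [List.not_mem_nil, false_iff]
      rintro ⟨jn, h1, h2⟩
      by_cases hx : x = c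
      · simp [hx] at h1; omega
      · rw [if_neg hx] at h1
        obtain ⟨jn', hj1, hj2⟩ := lastIdx_bound pre c _ h1
        have : jn' = jn := by exact_mod_cast hj1.symm
        omega

lemma slice_window (pre suf : List Char) (k : Int) :
    PySem.List.slice (pre ++ suf) (some (max 0 ((pre.length : Int) - k))) (some (pre.length : Int))
      = pre.drop (max 0 ((pre.length : Int) - k)).toNat := by
  rw [PySem.List.slice_toNat _ (le_max_left 0 _) (by positivity)]
  set m := (max 0 ((pre.length : Int) - k)).toNat with hm
  have hcast : ((pre.length : Int)).toNat = pre.length := by simp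
  rw [hcast]
  by_cases h : m ≤ pre.length
  · rw [List.drop_append_of_le_length h]
    rw [show pre.length - m = (pre.drop m).length by simp, List.take_left]
  · have h1 : pre.drop m = [] := List.drop_eq_nil_of_le (by omega)
    have h2 : pre.length - m = 0 := by omega
    rw [h2, List.take_zero, h1]

lemma fold_eq (k : Int) (cs : List Char) :
    ∀ (suf pre : List Char) (d : PySem.Dict Char Int) (acc : List Char),
    cs = pre ++ suf →
    (∀ c, d.get? c = lastIdx pre c) →
    (PySem.List.enumerate suf (pre.length : Int)).foldl
      (fun acc p =>
        if (PySem.List.slice cs (some (max 0 (p.1 - k))) (some p.1)).contains p.2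
        then acc ++ ['-'] else acc ++ [p.2]) acc
    = ((PySem.List.enumerate suf (pre.length : Int)).foldl
      (fun st p =>
        let out := match st.1.get? p.2 with
          | some j => if p.1 - k ≤ j then st.2 ++ ['-'] else st.2 ++ [p.2]
          | none => st.2 ++ [p.2]
        (st.1.insert p.2 p.1, out)) (d, acc)).2 := by
  intro suf
  induction suf with
  | nil => intro pre d acc _ _; simp [PySem.List.enumerate]
  | cons x rest ih =>
    intro pre d acc hcs hd
    rw [PySem.List.enumerate_cons, List.foldl_cons, List.foldl_cons]
    have hacc :
        (if (PySem.List.slice cs (some (max 0 ((pre.length : Int) - k))) (some (pre.length : Int))).contains x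
         then acc ++ ['-'] else acc ++ [x])
        = (match d.get? x with
            | some j => if (pre.length : Int) - k ≤ j then acc ++ ['-'] else acc ++ [x]
            | none => acc ++ [x]) := by
      rw [hcs, slice_window, hd]
      cases hli : lastIdx pre x with
      | none =>
        have : ¬ x ∈ pre.drop (max 0 ((pre.length : Int) - k)).toNat := by
          rw [mem_drop_iff_lastIdx]
          rintro ⟨jn, h1, _⟩; rw [hli] at h1; simp at h1
        simp [this]
      | some j =>
        obtain ⟨jn, rfl, hlt⟩ := lastIdx_bound pre x j hli
        have hiff : x ∈ pre.drop (max 0 ((pre.length : Int) - k)).toNat ↔ (pre.length : Int) - k ≤ (jn : Int) := by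
          rw [mem_drop_iff_lastIdx]
          constructor
          · rintro ⟨jn', h1, h2⟩
            rw [hli] at h1
            have : jn' = jn := by exact_mod_cast (Option.some.inj h1).symm
            subst this
            have := Int.toNat_le.mp h2
            omega
          · intro h
            exact ⟨jn, hli, Int.toNat_le.mpr (by omega)⟩
        by_cases hcond : (pre.length : Int) - k ≤ (jn : Int)
        · simp [hiff.mpr hcond, hcond]
        · have hnm : ¬ x ∈ pre.drop (max 0 ((pre.length : Int) - k)).toNat :=
            fun h => hcond (hiff.mp h)
          simp [hnm, hcond]
    rw [hacc]
    have hstep := ih (pre ++ [x]) (d.insert x (pre.length : Int))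
      (match d.get? x with
        | some j => if (pre.length : Int) - k ≤ j then acc ++ ['-'] else acc ++ [x]
        | none => acc ++ [x])
      (by simpa using hcs)
      (by
        intro c
        rw [lastIdx_snoc]
        by_cases hx : x = c
        · subst hx; rw [if_pos rfl]; exact PySem.Dict.get?_insert_self d x _
        · rw [if_neg hx, PySem.Dict.get?_insert_of_ne d _ (fun h => hx h.symm), hd])
    have hlen : ((pre ++ [x]).length : Int) = (pre.length : Int) + 1 := by simp
    rw [hlen] at hstep
    exact hstep

-- ===== VERDICT (by name: the statement is the Claim_ definition above) =====
theorem replace_repeated_chars_spec : Claim_equal_replace_repeated_chars := by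
  intro s k _
  unfold Spec_replace_repeated_chars replace_repeated_chars replace_repeated_chars_alt
  have h := fold_eq k s.toList s.toList [] PySem.Dict.empty [] rfl (fun c => rfl)
  simpa using congrArg String.ofList h
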